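-- pv_equiv track=rewrite | github.com/mmesiti/distillator | macros/main.py | complete_macro_names_set
-- ===== SOURCE A (Python) =====
-- def complete_macro_names_set(detected_used_macro_names, all_macros_versions):
--     # we make sure that all the macro that are referenced in other used macros
--     # are counted in.
--
--     groupreps = set(gr for gr, _, _ in all_macros_versions)
--
--     used_macro_names_groupreps = []
--     for grouprep in groupreps:
--         used_macro_names = frozenset(detected_used_macro_names)
--
--         all_macros = dict((name, body)
--                           for gr, name, body in all_macros_versions
--                           if gr == grouprep)
--
--         while True:
--             enlarged_macro_names = set(used_macro_names)
--
--             for macro_name in all_macros: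
--                 for used_macro in used_macro_names:
--                     if used_macro in all_macros and macro_name in all_macros[used_macro]:
--                         enlarged_macro_names.add(macro_name)
--
--             if used_macro_names == enlarged_macro_names:
--                 break
--             else:
--                 used_macro_names = frozenset(enlarged_macro_names)
--
--         used_macro_names_groupreps.append(used_macro_names)
--
--     used_macro_names = frozenset.union(*used_macro_names_groupreps)
--
--     return used_macro_names
-- ===== SOURCE B (Python) =====
-- def complete_macro_names_set(detected_used_macro_names, all_macros_versions):
--     # Closure via precomputed containment edges + frontier (BFS-by-levels) per group,
--     # instead of re-scanning every used macro's body until a fixed point.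
--     result = []
--     result_set = set()
--     for name in detected_used_macro_names:
--         if name not in result_set:
--             result_set.add(name)
--             result.append(name)
--     detected = list(result)
--
--     seen_groups = set()
--     for grouprep, _, _ in all_macros_versions:
--         if grouprep in seen_groups:
--             continue
--         seen_groups.add(grouprep)
--
--         bodies = {}
--         for gr, name, body in all_macros_versions:
--             if gr == grouprep:
--                 bodies[name] = body
--         keys = list(bodies)
--
--         # containment edges, computed once: preds[m] = macros whose body mentions m
--         preds = {m: [u for u in keys if m in bodies[u]] for m in keys}
--
--         used = set(detected)
--         frontier = detected
--         while frontier: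
--             fset = set(frontier)
--             new = [m for m in keys
--                    if m not in used and any(u in fset for u in preds[m])]
--             used.update(new)
--             for m in new:
--                 if m not in result_set:
--                     result_set.add(m)
--                     result.append(m)
--             frontier = new
--
--     if not all_macros_versions:
--         # union over zero groups: just the detected names
--         return frozenset(detected)
--     return frozenset(result)
-- ===== Notes on version B (the rewrite author's own statement) =====
-- stated objective: faster
-- what changed: A recomputes every name-in-body substring test against every used macro on every round of its fixed-point loop; B computes the containment edges once per group (a predecessor list per macro name) and closes the used set with a frontier-based BFS-by-levels worklist, deduplicating the final union incrementally.
-- outside the precondition, e.g. on complete_macro_names_set(['a'], []): A raises TypeError, B returns {'a'}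
import Mathlib
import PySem

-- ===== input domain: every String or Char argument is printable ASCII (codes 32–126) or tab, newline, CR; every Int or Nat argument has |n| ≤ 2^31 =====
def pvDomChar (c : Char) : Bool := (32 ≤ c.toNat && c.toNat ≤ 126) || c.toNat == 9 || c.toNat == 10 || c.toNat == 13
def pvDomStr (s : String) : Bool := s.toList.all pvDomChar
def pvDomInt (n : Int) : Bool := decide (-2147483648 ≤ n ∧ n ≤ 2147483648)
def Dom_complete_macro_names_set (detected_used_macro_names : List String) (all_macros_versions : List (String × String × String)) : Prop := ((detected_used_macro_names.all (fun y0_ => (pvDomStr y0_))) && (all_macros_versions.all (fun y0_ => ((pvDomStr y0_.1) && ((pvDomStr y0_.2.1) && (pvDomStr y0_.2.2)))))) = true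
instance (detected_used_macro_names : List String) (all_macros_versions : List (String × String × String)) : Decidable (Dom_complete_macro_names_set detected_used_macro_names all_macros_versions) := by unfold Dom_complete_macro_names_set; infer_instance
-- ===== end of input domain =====

-- B replaces A's repeated full rescan fixed-point (re-testing substring containment of every
-- used macro's body every round) by containment edges computed once per group plus a
-- frontier-based (BFS-by-levels) closure.  Equivalence is about the RETURN value (a set).

-- ===== PORT A =====
-- one round of A's while-body: enlarged = set(used); for macro_name in all_macros: for used_macro in used: …
def pvStepA (all_macros : PySem.Dict String String) (used : PySem.Set String) : PySem.Set String :=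
  all_macros.keys.foldl (fun enlarged macro_name =>
    used.foldl (fun enlarged used_macro =>
      match all_macros.get? used_macro with
      | some b => if PySem.Str.isIn macro_name b then PySem.Set.add enlarged macro_name else enlarged
      | none => enlarged) enlarged)
    (PySem.Set.ofList used)

-- A's 'while True' (fuel keys+1 suffices: every continuing round adds at least one key)
def pvLoopA (all_macros : PySem.Dict String String) : Nat → PySem.Set String → PySem.Set String
  | 0, used => used
  | n+1, used =>
    let enlarged := pvStepA all_macros used
    if PySem.Set.equal used enlarged then used else pvLoopA all_macros n enlarged

def complete_macro_names_set (detected_used_macro_names : List String) (all_macros_versions : List (String × String × String)) : List String :=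
  let groupreps : PySem.Set String := PySem.Set.ofList (all_macros_versions.map (fun t => t.1))
  let used_macro_names_groupreps : List (PySem.Set String) := groupreps.map (fun grouprep =>
    let all_macros : PySem.Dict String String :=
      (all_macros_versions.filter (fun t => t.1 == grouprep)).foldl
        (fun d t => d.insert t.2.1 t.2.2) PySem.Dict.empty
    pvLoopA all_macros (all_macros.keys.length + 1) (PySem.Set.ofList detected_used_macro_names))
  match used_macro_names_groupreps with
  | [] => []   -- Python: frozenset.union(*[]) raises TypeError; excluded by Pre_
  | s :: rest => rest.foldl (fun acc t => PySem.Set.union acc t) s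

-- ===== PORT B =====
def pvBodies (all_macros_versions : List (String × String × String)) (grouprep : String) : PySem.Dict String String :=
  all_macros_versions.foldl (fun d t => if t.1 == grouprep then d.insert t.2.1 t.2.2 else d) PySem.Dict.empty

-- Source B's 'while frontier' loop (fuel keys+1 suffices: every round after the first needs a non-empty 'new')
def pvLoopB (keys : List String) (preds : PySem.Dict String (List String)) :
    Nat → PySem.Set String → PySem.Set String → List String → PySem.Set String
  | n, result, used, frontier =>
    match frontier with
    | [] => result
    | _ :: _ =>
      match n with
      | 0 => result
      | n+1 =>
        let fset := PySem.Set.ofList frontier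
        let new := keys.filter (fun m =>
          !PySem.Set.contains used m && (preds.getD m []).any (fun u => PySem.Set.contains fset u))
        pvLoopB keys preds n (PySem.Set.update result new) (PySem.Set.update used new) new

def complete_macro_names_set_alt (detected_used_macro_names : List String) (all_macros_versions : List (String × String × String)) : List String :=
  let detected : PySem.Set String := PySem.Set.ofList detected_used_macro_names
  (all_macros_versions.foldl (fun (acc : PySem.Set String × PySem.Set String) t =>
      if PySem.Set.contains acc.2 t.1 then acc
      else
        let bodies := pvBodies all_macros_versions t.1
        let keys := bodies.keys
        let preds : PySem.Dict String (List String) :=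
          keys.foldl (fun d m =>
            d.insert m (keys.filter (fun u => PySem.Str.isIn m (bodies.getD u "")))) PySem.Dict.empty
        (pvLoopB keys preds (keys.length + 1) acc.1 (PySem.Set.ofList detected) detected,
         PySem.Set.add acc.2 t.1))
    (detected, PySem.Set.empty)).1

-- ===== PRECONDITION & SPEC =====
-- Pre_ excludes only the empty macro list, on which A raises TypeError (frozenset.union(*[]) gets no argument).
def Pre_complete_macro_names_set (detected_used_macro_names : List String) (all_macros_versions : List (String × String × String)) : Prop :=
  all_macros_versions ≠ []
instance (detected_used_macro_names : List String) (all_macros_versions : List (String × String × String)) : Decidable (Pre_complete_macro_names_set detected_used_macro_names all_macros_versions) := by unfold Pre_complete_macro_names_set; infer_instance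

def pvWitness_complete_macro_names_set : List String × (List (String × String × String)) :=
  (["a"], [("g", "b", "a"), ("g", "c", "b")])

def Spec_complete_macro_names_set (detected_used_macro_names : List String) (all_macros_versions : List (String × String × String)) (out : List String) : Prop := out = complete_macro_names_set_alt detected_used_macro_names all_macros_versions
instance (detected_used_macro_names : List String) (all_macros_versions : List (String × String × String)) (out : List String) : Decidable (Spec_complete_macro_names_set detected_used_macro_names all_macros_versions out) := by unfold Spec_complete_macro_names_set; infer_instance

-- ===== CLAIM (what is proved, stated in full; the proofs are below) =====
def Claim_equal_complete_macro_names_set : Prop := ∀ (detected_used_macro_names : List String) (all_macros_versions : List (String × String × String)), Dom_complete_macro_names_set detected_used_macro_names all_macros_versions → Pre_complete_macro_names_set detected_used_macro_names all_macros_versions → Spec_complete_macro_names_set detected_used_macro_names all_macros_versions (complete_macro_names_set detected_used_macro_names all_macros_versions)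

-- ===== LEMMAS AND PROOFS =====

-- A's success test for one (macro_name, used_macro) pair
def pvCondA (am : PySem.Dict String String) (m u : String) : Bool :=
  match am.get? u with
  | some b => PySem.Str.isIn m b
  | none => false

-- the new names one round adds, in B's (= dict-key) order
def pvRound (am : PySem.Dict String String) (used F : List String) : List String :=
  am.keys.filter (fun m =>
    !PySem.Set.contains used m &&
      (am.keys.filter (fun u => PySem.Str.isIn m (am.getD u ""))).any
        (fun u => PySem.Set.contains (PySem.Set.ofList F) u))

-- all names the closure adds from frontier F, round by round
def pvChain (am : PySem.Dict String String) : Nat → List String → List String → List String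
  | 0, _, _ => []
  | n+1, used, F =>
    if F.isEmpty then []
    else
      let new := pvRound am used F
      new ++ pvChain am n (used ++ new) new

def pvPreds (am : PySem.Dict String String) : PySem.Dict String (List String) :=
  am.keys.foldl (fun d m =>
    d.insert m (am.keys.filter (fun u => PySem.Str.isIn m (am.getD u "")))) PySem.Dict.empty

-- the closedness invariant: every edge out of an already-processed used name stays inside used
def pvClosed (am : PySem.Dict String String) (used F : List String) : Prop :=
  ∀ u ∈ used, u ∈ am.keys → u ∉ F →
    ∀ m ∈ am.keys, PySem.Str.isIn m (am.getD u "") = true → m ∈ used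

lemma pv_contains_eq (s : PySem.Set String) (x : String) :
    PySem.Set.contains s x = decide (x ∈ s) := by
  cases h : decide (x ∈ s)
  · cases hc : PySem.Set.contains s x
    · rfl
    · exact absurd ((PySem.Set.contains_iff _ _).1 hc) (by simpa using h)
  · exact (PySem.Set.contains_iff _ _).2 (by simpa using h)

lemma pv_filter_length_lt {α : Type} (l : List α) (p q : α → Bool)
    (himp : ∀ x ∈ l, p x = true → q x = true) (x : α) (hx : x ∈ l)
    (hq : q x = true) (hp : p x = false) :
    (l.filter p).length < (l.filter q).length := by
  induction l with
  | nil => cases hx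
  | cons y t ih =>
    by_cases hy : p y = true
    · have hqy : q y = true := himp y (List.mem_cons_self ..) hy
      have hxt : x ∈ t := by
        rcases List.mem_cons.1 hx with rfl | h
        · rw [hp] at hy; cases hy
        · exact h
      simp only [List.filter_cons, hy, hqy, if_pos, List.length_cons]
      exact Nat.succ_lt_succ (ih (fun z hz => himp z (List.mem_cons_of_mem _ hz)) hxt)
    · have hpy : p y = false := by simpa using hy
      have hmono : (t.filter p).length ≤ (t.filter q).length := by
        simp only [← List.countP_eq_length_filter]
        exact List.countP_mono_left (fun z hz => himp z (List.mem_cons_of_mem _ hz))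
      rcases List.mem_cons.1 hx with rfl | hxt
      · simp only [List.filter_cons, hpy, hq, if_pos, List.length_cons]
        simp only [Bool.false_eq_true, if_false]
        exact Nat.lt_succ_of_le hmono
      · by_cases hqy : q y = true
        · simp only [List.filter_cons, hpy, hqy, Bool.false_eq_true, if_false, if_pos,
            List.length_cons]
          exact Nat.lt_succ_of_le
            (Nat.le_of_lt (ih (fun z hz => himp z (List.mem_cons_of_mem _ hz)) hxt))
        · have hqy' : q y = false := by simpa using hqy
          simp only [List.filter_cons, hpy, hqy', Bool.false_eq_true, if_false]
          exact ih (fun z hz => himp z (List.mem_cons_of_mem _ hz)) hxt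

lemma pv_foldl_ite_add_of_mem (l : List String) (s : PySem.Set String) (x : String)
    (q : String → Bool) (hx : x ∈ s) :
    l.foldl (fun e u => if q u then PySem.Set.add e x else e) s = s := by
  induction l with
  | nil => rfl
  | cons u t ih =>
    simp only [List.foldl_cons]
    by_cases h : q u = true
    · rw [if_pos h, PySem.Set.add_of_mem hx]; exact ih
    · rw [if_neg h]; exact ih

lemma pv_foldl_ite_add_eq_any (l : List String) (s : PySem.Set String) (x : String)
    (q : String → Bool) :
    l.foldl (fun e u => if q u then PySem.Set.add e x else e) s
      = if l.any q then PySem.Set.add s x else s := by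
  induction l generalizing s with
  | nil => simp
  | cons u t ih =>
    simp only [List.foldl_cons, List.any_cons]
    by_cases h : q u = true
    · simp only [h, if_true, Bool.true_or]
      exact pv_foldl_ite_add_of_mem t _ x q ((PySem.Set.mem_add _ _ _).2 (Or.inr rfl))
    · have h' : q u = false := by simpa using h
      simp only [h', Bool.false_eq_true, if_false, Bool.false_or]
      exact ih s

lemma pv_foldl_any_add (keys : List String) (q : String → Bool) :
    ∀ s : PySem.Set String, keys.Nodup → s.Nodup →
    keys.foldl (fun e m => if q m then PySem.Set.add e m else e) s
      = s ++ keys.filter (fun m => q m && !PySem.Set.contains s m) := by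
  induction keys with
  | nil => intro s _ _; simp
  | cons m ms ih =>
    intro s hnd hs
    obtain ⟨hm, hms⟩ := List.nodup_cons.1 hnd
    simp only [List.foldl_cons, List.filter_cons]
    by_cases hq : q m = true
    · by_cases hmem : m ∈ s
      · have hcont : PySem.Set.contains s m = true := by
          rw [pv_contains_eq, decide_eq_true hmem]
        simp only [hq, hcont, Bool.not_true, Bool.and_false, Bool.false_eq_true, if_false,
          if_true, PySem.Set.add_of_mem hmem]
        exact ih s hms hs
      · have hcont : PySem.Set.contains s m = false := by
          rw [pv_contains_eq]; simpa using hmem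
        have hnd2 : (s ++ [m]).Nodup := by
          rw [List.nodup_append]
          refine ⟨hs, List.nodup_singleton m, fun a ha b hb heq => ?_⟩
          simp only [List.mem_singleton] at hb
          subst hb; exact hmem (heq ▸ ha)
        simp only [hq, hcont, Bool.not_false, Bool.and_self, if_true,
          PySem.Set.add_of_not_mem hmem]
        rw [ih (s ++ [m]) hms hnd2]
        rw [List.filter_congr (q := fun x => q x && !PySem.Set.contains s x)
          (fun x hx => by
            have hxm : x ≠ m := fun h => hm (h ▸ hx)
            simp [hxm])]
        simp
    · have hq' : q m = false := by simpa using hq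
      simp only [hq', Bool.false_eq_true, if_false, Bool.false_and]
      exact ih s hms hs

lemma pv_stepA_eq (am : PySem.Dict String String) (used : PySem.Set String)
    (hk : am.keys.Nodup) (hu : used.Nodup) :
    pvStepA am used
      = used ++ am.keys.filter (fun m => used.any (pvCondA am m) && !PySem.Set.contains used m) := by
  unfold pvStepA
  rw [PySem.Set.ofList_eq_self_of_nodup used hu]
  have hbody : (fun (enlarged : PySem.Set String) macro_name =>
      used.foldl (fun enlarged used_macro =>
        match am.get? used_macro with
        | some b => if PySem.Str.isIn macro_name b then PySem.Set.add enlarged macro_name else enlarged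
        | none => enlarged) enlarged)
      = fun (enlarged : PySem.Set String) m =>
        if used.any (pvCondA am m) then PySem.Set.add enlarged m else enlarged := by
    funext enl m
    have hfun : (fun (e : PySem.Set String) u =>
        match am.get? u with
        | some b => if PySem.Str.isIn m b then PySem.Set.add e m else e
        | none => e)
        = fun (e : PySem.Set String) u => if pvCondA am m u then PySem.Set.add e m else e := by
      funext e u
      unfold pvCondA
      cases am.get? u with
      | none => simp
      | some b => rfl
    rw [hfun, pv_foldl_ite_add_eq_any]
  rw [hbody]
  exact pv_foldl_any_add am.keys _ used hk hu

lemma pvCondA_eq_true_iff (am : PySem.Dict String String) (m u : String) :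
    pvCondA am m u = true ↔ ∃ b, am.get? u = some b ∧ PySem.Str.isIn m b = true := by
  unfold pvCondA
  cases h : am.get? u <;> simp

lemma pv_round_eq (am : PySem.Dict String String) (used F : List String)
    (hF : ∀ x ∈ F, x ∈ used) (hcl : pvClosed am used F) :
    am.keys.filter (fun m => used.any (pvCondA am m) && !PySem.Set.contains used m)
      = pvRound am used F := by
  apply List.filter_congr
  intro m hm
  rw [List.any_filter]
  cases hc : PySem.Set.contains used m with
  | true => simp
  | false =>
    simp only [Bool.not_false, Bool.and_true, Bool.true_and]
    have hmem : m ∉ used := by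
      rw [pv_contains_eq] at hc; simpa using hc
    rw [Bool.eq_iff_iff, List.any_eq_true, List.any_eq_true]
    constructor
    · rintro ⟨u, hu, hcu⟩
      obtain ⟨b, hg, hisin⟩ := (pvCondA_eq_true_iff am m u).1 hcu
      have hukeys : u ∈ am.keys := by
        by_contra hn
        rw [(PySem.Dict.get?_eq_none_iff_not_mem_keys _ _).2 hn] at hg; cases hg
      have hgd : am.getD u "" = b := by
        rw [PySem.Dict.getD_eq_get?_getD, hg]; rfl
      have huF : u ∈ F := by
        by_contra hnF
        exact hmem (hcl u hu hukeys hnF m hm (by rw [hgd]; exact hisin))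
      refine ⟨u, hukeys, ?_⟩
      rw [hgd, hisin, pv_contains_eq,
        decide_eq_true ((PySem.Set.mem_ofList _ _).2 huF)]
      rfl
    · rintro ⟨u, hu, hcu⟩
      rw [Bool.and_eq_true] at hcu
      have huF : u ∈ F := by
        have h2 := hcu.2
        rw [pv_contains_eq] at h2
        exact (PySem.Set.mem_ofList _ _).1 (by simpa using h2)
      refine ⟨u, hF u huF, ?_⟩
      have hsome : am.get? u = some (am.getD u "") := by
        cases hg : am.get? u with
        | none =>
          exact absurd ((PySem.Dict.get?_eq_none_iff_not_mem_keys _ _).1 hg) (by simp [hu])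
        | some b => rw [PySem.Dict.getD_eq_get?_getD, hg]; rfl
      exact (pvCondA_eq_true_iff am m u).2 ⟨am.getD u "", hsome, hcu.1⟩

lemma pv_update_of_disjoint (s : PySem.Set String) (l : List String)
    (hnd : l.Nodup) (hdisj : ∀ x ∈ l, x ∉ s) :
    PySem.Set.update s l = s ++ l := by
  induction l generalizing s with
  | nil => simp [PySem.Set.update_nil]
  | cons x xs ih =>
    rw [PySem.Set.update_cons, PySem.Set.add_of_not_mem (hdisj x (List.mem_cons_self ..))]
    rw [ih (s ++ [x]) (List.Nodup.of_cons hnd) ?_]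
    · simp
    · intro y hy
      simp only [List.mem_append, List.mem_singleton]
      rintro (h | rfl)
      · exact hdisj y (List.mem_cons_of_mem _ hy) h
      · exact (List.nodup_cons.1 hnd).1 hy

lemma pv_update_of_subset (s : PySem.Set String) (l : List String)
    (hsub : ∀ x ∈ l, x ∈ s) :
    PySem.Set.update s l = s := by
  induction l generalizing s with
  | nil => simp [PySem.Set.update_nil]
  | cons x xs ih =>
    rw [PySem.Set.update_cons, PySem.Set.add_of_mem (hsub x (List.mem_cons_self ..))]
    exact ih s (fun y hy => hsub y (List.mem_cons_of_mem _ hy))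

lemma pv_round_sub (am : PySem.Dict String String) (used F : List String) :
    ∀ m ∈ pvRound am used F, m ∈ am.keys ∧ m ∉ used := by
  intro m hm
  obtain ⟨hk, hcond⟩ := List.mem_filter.1 hm
  refine ⟨hk, fun hmem => ?_⟩
  rw [pv_contains_eq, decide_eq_true hmem] at hcond
  simp at hcond

lemma pv_round_nodup (am : PySem.Dict String String) (used F : List String)
    (hk : am.keys.Nodup) : (pvRound am used F).Nodup := hk.filter _

lemma pv_chain_nodup (am : PySem.Dict String String) (hk : am.keys.Nodup) :
    ∀ (n : Nat) (used F : List String), used.Nodup → (used ++ pvChain am n used F).Nodup := by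
  intro n
  induction n with
  | zero => intro used F hu; simpa [pvChain] using hu
  | succ n ih =>
    intro used F hu
    cases hF : F.isEmpty
    · simp only [pvChain, hF, Bool.false_eq_true, if_false]
      have hnd1 : (used ++ pvRound am used F).Nodup := by
        rw [List.nodup_append]
        refine ⟨hu, pv_round_nodup am used F hk, fun a ha b hb heq => ?_⟩
        exact (pv_round_sub am used F b hb).2 (heq ▸ ha)
      have h := ih (used ++ pvRound am used F) (pvRound am used F) hnd1
      rwa [List.append_assoc] at h
    · simpa [pvChain, hF] using hu

lemma pv_getD_preds (am : PySem.Dict String String) (hk : am.keys.Nodup) (m : String)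
    (hm : m ∈ am.keys) :
    (pvPreds am).getD m [] = am.keys.filter (fun u => PySem.Str.isIn m (am.getD u "")) := by
  have hitems : (pvPreds am).items
      = am.keys.map (fun m => (m, am.keys.filter (fun u => PySem.Str.isIn m (am.getD u "")))) := by
    unfold pvPreds
    have h := PySem.Dict.items_foldl_insert_fresh (l := am.keys) (k := fun m => m)
      (v := fun m => am.keys.filter (fun u => PySem.Str.isIn m (am.getD u "")))
      (d := PySem.Dict.empty) (fun a _ => PySem.Dict.contains_empty ..) (by simpa using hk)
    simpa using h
  have hnd : (pvPreds am).keys.Nodup := by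
    unfold pvPreds
    exact PySem.Dict.nodup_keys_foldl_insert am.keys
      (fun d m => am.keys.filter (fun u => PySem.Str.isIn m (am.getD u ""))) PySem.Dict.empty
      PySem.Dict.nodup_keys_empty
  have hmem : (m, am.keys.filter (fun u => PySem.Str.isIn m (am.getD u ""))) ∈ (pvPreds am).items := by
    rw [hitems]; exact List.mem_map.2 ⟨m, hm, rfl⟩
  exact PySem.Dict.getD_of_mem_items _ hmem hnd []

lemma pv_loopB_eq (am : PySem.Dict String String) (hk : am.keys.Nodup) :
    ∀ (n : Nat) (result used : PySem.Set String) (F : List String),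
    pvLoopB am.keys (pvPreds am) n result used F
      = PySem.Set.update result (pvChain am n used F) := by
  intro n
  induction n with
  | zero =>
    intro result used F
    cases F with
    | nil => simp [pvLoopB, pvChain, PySem.Set.update_nil]
    | cons f fs => simp [pvLoopB, pvChain, PySem.Set.update_nil]
  | succ n ih =>
    intro result used F
    cases F with
    | nil => simp [pvLoopB, pvChain, PySem.Set.update_nil]
    | cons f fs =>
      have hnew : am.keys.filter (fun m =>
          !PySem.Set.contains used m && ((pvPreds am).getD m []).any
            (fun u => PySem.Set.contains (PySem.Set.ofList (f :: fs)) u))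
          = pvRound am used (f :: fs) :=
        List.filter_congr (fun m hm => by rw [pv_getD_preds am hk m hm])
      have hdisj : PySem.Set.update used (pvRound am used (f :: fs))
          = used ++ pvRound am used (f :: fs) :=
        pv_update_of_disjoint used _ (pv_round_nodup am used (f :: fs) hk)
          (fun x hx => (pv_round_sub am used (f :: fs) x hx).2)
      simp only [pvLoopB, pvChain, List.isEmpty_cons, Bool.false_eq_true, if_false]
      rw [hnew, hdisj, ih, PySem.Set.update_append]

lemma pv_round_nil (am : PySem.Dict String String) (used : List String) :
    pvRound am used [] = [] := by
  unfold pvRound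
  rw [List.filter_eq_nil_iff]
  intro m _
  simp

lemma pv_chain_nil (am : PySem.Dict String String) (n : Nat) (used : List String) :
    pvChain am n used [] = [] := by
  cases n <;> simp [pvChain]

lemma pv_loopA_eq (am : PySem.Dict String String) (hk : am.keys.Nodup) :
    ∀ (n : Nat) (used F : List String), used.Nodup → (∀ x ∈ F, x ∈ used) →
    pvClosed am used F →
    (am.keys.filter (fun m => !PySem.Set.contains used m)).length < n →
    pvLoopA am n used = used ++ pvChain am n used F := by
  intro n
  induction n with
  | zero => intro used F _ _ _ hfuel; exact absurd hfuel (Nat.not_lt_zero _)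
  | succ n ih =>
    intro used F hu hsub hcl hfuel
    have hstep : pvStepA am used = used ++ pvRound am used F := by
      rw [pv_stepA_eq am used hk hu, pv_round_eq am used F hsub hcl]
    cases F with
    | nil =>
      have hrnil : pvRound am used [] = [] := pv_round_nil am used
      have hequ : PySem.Set.equal used used = true :=
        (PySem.Set.equal_iff used used).2 (fun x => Iff.rfl)
      simp [pvLoopA, hstep, hrnil, pvChain, hequ]
    | cons f fs =>
      by_cases hne : pvRound am used (f :: fs) = []
      · have hequ : PySem.Set.equal used used = true :=
          (PySem.Set.equal_iff used used).2 (fun x => Iff.rfl)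
        simp [pvLoopA, hstep, hne, pvChain, hequ, pv_chain_nil]
      · obtain ⟨x, hx⟩ := List.exists_mem_of_ne_nil _ hne
        have hxk := pv_round_sub am used (f :: fs) x hx
        have heqf : PySem.Set.equal used (used ++ pvRound am used (f :: fs)) = false := by
          cases h : PySem.Set.equal used (used ++ pvRound am used (f :: fs))
          · rfl
          · have h2 := ((PySem.Set.equal_iff _ _).1 h x).2
              (List.mem_append.2 (Or.inr hx))
            exact absurd h2 hxk.2
        simp only [pvLoopA, hstep, heqf, Bool.false_eq_true, if_false, pvChain,
          List.isEmpty_cons]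
        set new := pvRound am used (f :: fs) with hnewdef
        have hund : (used ++ new).Nodup := by
          rw [List.nodup_append]
          refine ⟨hu, pv_round_nodup am used (f :: fs) hk, fun a ha b hb heq => ?_⟩
          exact (pv_round_sub am used (f :: fs) b hb).2 (heq ▸ ha)
        have hcl' : pvClosed am (used ++ new) new := by
          intro u hu' huk hnF m hmk hisin
          rcases List.mem_append.1 hu' with huu | hun
          · by_cases hmu : m ∈ used
            · exact List.mem_append.2 (Or.inl hmu)
            · by_cases huF : u ∈ (f :: fs)
              · refine List.mem_append.2 (Or.inr ?_)
                rw [hnewdef]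
                refine List.mem_filter.2 ⟨hmk, ?_⟩
                rw [Bool.and_eq_true]
                constructor
                · rw [pv_contains_eq]; simpa using hmu
                · rw [List.any_eq_true]
                  refine ⟨u, List.mem_filter.2 ⟨huk, hisin⟩, ?_⟩
                  rw [pv_contains_eq,
                    decide_eq_true ((PySem.Set.mem_ofList _ _).2 huF)]
              · exact List.mem_append.2 (Or.inl (hcl u huu huk huF m hmk hisin))
          · exact absurd hun hnF
        have hfuel' : (am.keys.filter (fun m => !PySem.Set.contains (used ++ new) m)).length < n := by
          have hlt : (am.keys.filter (fun m => !PySem.Set.contains (used ++ new) m)).length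
              < (am.keys.filter (fun m => !PySem.Set.contains used m)).length := by
            refine pv_filter_length_lt am.keys _ _ (fun z hz hp => ?_) x hxk.1 ?_ ?_
            · rw [pv_contains_eq] at hp ⊢
              simp only [Bool.not_eq_eq_eq_not, Bool.not_true, decide_eq_false_iff_not] at hp ⊢
              exact fun hzin => hp (List.mem_append.2 (Or.inl hzin))
            · rw [pv_contains_eq]; simpa using hxk.2
            · rw [pv_contains_eq]
              simp [List.mem_append, hx]
          omega
        rw [ih (used ++ new) new hund (fun y hy => List.mem_append.2 (Or.inr hy)) hcl' hfuel']
        rw [List.append_assoc]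

-- the group representatives B's 'seen' bookkeeping lets through, in order
def pvNewElems (seen : PySem.Set String) : List String → List String
  | [] => []
  | x :: xs =>
    if PySem.Set.contains seen x then pvNewElems seen xs
    else x :: pvNewElems (PySem.Set.add seen x) xs

lemma pv_newElems_update (l : List String) :
    ∀ seen : PySem.Set String, seen ++ pvNewElems seen l = PySem.Set.update seen l := by
  induction l with
  | nil => intro seen; simp [pvNewElems, PySem.Set.update_nil]
  | cons x xs ih =>
    intro seen
    rw [PySem.Set.update_cons]
    by_cases h : x ∈ seen
    · have hc : PySem.Set.contains seen x = true := by
        rw [pv_contains_eq, decide_eq_true h]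
      rw [PySem.Set.add_of_mem h]
      simp only [pvNewElems, hc, if_pos]
      exact ih seen
    · have hc : PySem.Set.contains seen x = false := by
        rw [pv_contains_eq]; simpa using h
      simp only [pvNewElems, hc, Bool.false_eq_true, if_false]
      rw [PySem.Set.add_of_not_mem h, ← ih (seen ++ [x])]
      simp

lemma pv_foldl_seen {β : Type} (g : PySem.Set String → String → PySem.Set String)
    (f : β → String) :
    ∀ (l : List β) (r seen : PySem.Set String),
    (l.foldl (fun acc t => if PySem.Set.contains acc.2 (f t) then acc
        else (g acc.1 (f t), PySem.Set.add acc.2 (f t))) (r, seen)).1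
      = (pvNewElems seen (l.map f)).foldl g r := by
  intro l
  induction l with
  | nil => intro r seen; rfl
  | cons t ts ih =>
    intro r seen
    simp only [List.foldl_cons, List.map_cons, pvNewElems]
    by_cases h : PySem.Set.contains seen (f t) = true
    · simp only [h, if_pos]
      exact ih r seen
    · have h' : PySem.Set.contains seen (f t) = false := by simpa using h
      simp only [h', Bool.false_eq_true, if_false, List.foldl_cons]
      exact ih _ _

lemma pv_newElems_nil (l : List String) :
    pvNewElems PySem.Set.empty l = PySem.Set.ofList l := by
  have h := pv_newElems_update l PySem.Set.empty
  simpa [PySem.Set.empty] using h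

lemma pv_fold_union (detd : PySem.Set String) (chainOf : String → List String) :
    ∀ (gs : List String) (acc : PySem.Set String), (∀ x ∈ detd, x ∈ acc) →
    gs.foldl (fun a g => PySem.Set.union a (detd ++ chainOf g)) acc
      = gs.foldl (fun r g => PySem.Set.update r (chainOf g)) acc := by
  intro gs
  induction gs with
  | nil => intro acc _; rfl
  | cons g gsr ih =>
    intro acc hacc
    simp only [List.foldl_cons]
    have h1 : PySem.Set.union acc (detd ++ chainOf g) = PySem.Set.update acc (chainOf g) := by
      show PySem.Set.update acc (detd ++ chainOf g) = _
      rw [PySem.Set.update_append, pv_update_of_subset acc detd hacc]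
    rw [h1]
    exact ih _ (fun x hx => (PySem.Set.mem_update _ _ _).2 (Or.inl (hacc x hx)))

-- per-group closure set, as shared by both sides of the proof
def pvChainOf (detected_used_macro_names : List String)
    (all_macros_versions : List (String × String × String)) (g : String) : List String :=
  pvChain (pvBodies all_macros_versions g)
    ((pvBodies all_macros_versions g).keys.length + 1)
    (PySem.Set.ofList detected_used_macro_names) (PySem.Set.ofList detected_used_macro_names)

-- ===== VERDICT (by name: the statement is the Claim_ definition above) =====
theorem complete_macro_names_set_spec : Claim_equal_complete_macro_names_set := by
  intro detected amv _ hpre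
  unfold Spec_complete_macro_names_set
  have hdnd : (PySem.Set.ofList detected).Nodup := PySem.Set.nodup_ofList detected
  set detd : PySem.Set String := PySem.Set.ofList detected with hdetd
  set chainOf : String → List String := pvChainOf detected amv with hchainOf
  -- the per-group dictionary built by A is the one built by B
  have hdict : ∀ g : String, (amv.filter (fun t => t.1 == g)).foldl
      (fun d t => d.insert t.2.1 t.2.2) PySem.Dict.empty = pvBodies amv g := by
    intro g
    rw [List.foldl_filter]
    rfl
  have hknd : ∀ g : String, (pvBodies amv g).keys.Nodup := by
    intro g
    rw [← hdict g]
    exact PySem.Dict.nodup_keys_foldl_insert_key (amv.filter (fun t => t.1 == g))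
      (fun t : String × String × String => t.2.1)
      (fun _ t => t.2.2) PySem.Dict.empty PySem.Dict.nodup_keys_empty
  -- what A computes for one group
  have hgroup : ∀ g : String,
      pvLoopA (pvBodies amv g) ((pvBodies amv g).keys.length + 1) detd
        = detd ++ chainOf g := by
    intro g
    exact pv_loopA_eq (pvBodies amv g) (hknd g) _ detd detd hdnd (fun x h => h)
      (fun u hu _ hnF => absurd hu hnF)
      (Nat.lt_succ_of_le (List.length_filter_le _ _))
  -- the chain is disjoint from detd and duplicate-free
  have hchain : ∀ g : String, PySem.Set.update detd (chainOf g) = detd ++ chainOf g := by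
    intro g
    have hnd := pv_chain_nodup (pvBodies amv g) (hknd g)
      ((pvBodies amv g).keys.length + 1) detd detd hdnd
    rw [List.nodup_append] at hnd
    exact pv_update_of_disjoint detd _ hnd.2.1 (fun x hx hxd => hnd.2.2 x hxd x hx rfl)
  -- B's result, with the seen-set bookkeeping removed
  have hB : complete_macro_names_set_alt detected amv
      = (PySem.Set.ofList (amv.map (fun t => t.1))).foldl
          (fun r g => PySem.Set.update r (chainOf g)) detd := by
    have h := pv_foldl_seen
      (fun r g => pvLoopB (pvBodies amv g).keys (pvPreds (pvBodies amv g))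
        ((pvBodies amv g).keys.length + 1) r (PySem.Set.ofList detd) detd)
      (fun t : String × String × String => t.1) amv detd PySem.Set.empty
    have h2 : complete_macro_names_set_alt detected amv
        = (pvNewElems PySem.Set.empty (amv.map (fun t : String × String × String => t.1))).foldl
          (fun r g => pvLoopB (pvBodies amv g).keys (pvPreds (pvBodies amv g))
            ((pvBodies amv g).keys.length + 1) r (PySem.Set.ofList detd) detd) detd := h
    rw [h2, pv_newElems_nil]
    have h3 : (fun (r : PySem.Set String) (g : String) =>
        pvLoopB (pvBodies amv g).keys (pvPreds (pvBodies amv g))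
          ((pvBodies amv g).keys.length + 1) r (PySem.Set.ofList detd) detd)
        = fun r g => PySem.Set.update r (chainOf g) := by
      funext r g
      rw [pv_loopB_eq (pvBodies amv g) (hknd g), PySem.Set.ofList_eq_self_of_nodup detd hdnd]
      rfl
    rw [h3]
  -- A's result
  have hA : complete_macro_names_set detected amv
      = (PySem.Set.ofList (amv.map (fun t => t.1))).foldl
          (fun r g => PySem.Set.update r (chainOf g)) detd := by
    have hmap : (PySem.Set.ofList (amv.map (fun t => t.1))).map
        (fun grouprep => pvLoopA
          ((amv.filter (fun t => t.1 == grouprep)).foldl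
            (fun d t => d.insert t.2.1 t.2.2) PySem.Dict.empty)
          (((amv.filter (fun t => t.1 == grouprep)).foldl
            (fun d t => d.insert t.2.1 t.2.2) PySem.Dict.empty).keys.length + 1)
          (PySem.Set.ofList detected))
        = (PySem.Set.ofList (amv.map (fun t => t.1))).map
          (fun g => detd ++ chainOf g) := by
      apply List.map_congr_left
      intro g _
      rw [hdict g]
      exact hgroup g
    show (match (PySem.Set.ofList (amv.map (fun t => t.1))).map
        (fun grouprep => pvLoopA
          ((amv.filter (fun t => t.1 == grouprep)).foldl
            (fun d t => d.insert t.2.1 t.2.2) PySem.Dict.empty)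
          (((amv.filter (fun t => t.1 == grouprep)).foldl
            (fun d t => d.insert t.2.1 t.2.2) PySem.Dict.empty).keys.length + 1)
          (PySem.Set.ofList detected)) with
      | [] => ([] : List String)
      | s :: rest => rest.foldl (fun acc t => PySem.Set.union acc t) s) = _
    rw [hmap]
    obtain ⟨a, amvr, rfl⟩ : ∃ a amvr, amv = a :: amvr := by
      cases amv with
      | nil => exact absurd rfl hpre
      | cons a l => exact ⟨a, l, rfl⟩
    rw [List.map_cons, PySem.Set.ofList_cons, List.map_cons, List.foldl_cons]
    set gt := PySem.Set.discard (PySem.Set.ofList (amvr.map (fun t => t.1))) a.1 with hgt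
    have hmatch : (match (detd ++ chainOf a.1) :: List.map (fun g => detd ++ chainOf g) gt with
        | [] => ([] : List String)
        | s :: rest => rest.foldl (fun acc t => PySem.Set.union acc t) s)
        = (List.map (fun g => detd ++ chainOf g) gt).foldl
            (fun acc t => PySem.Set.union acc t) (detd ++ chainOf a.1) := rfl
    rw [hmatch, List.foldl_map,
      pv_fold_union detd chainOf gt (detd ++ chainOf a.1)
        (fun x hx => List.mem_append.2 (Or.inl hx)),
      ← hchain a.1]
  rw [hA, hB]
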